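-- pv_equiv track=rewrite | github.com/Remco28/todoist_telegram | backend/api/reference_resolution.py | run_has_term_overlap
-- ===== SOURCE A (Python) =====
-- def run_has_term_overlap(title_terms: set[str], msg_terms: set[str]) -> bool:
--     for message_term in msg_terms:
--         if len(message_term) < 4:
--             continue
--         for title_term in title_terms:
--             if len(title_term) < 4:
--                 continue
--             if (
--                 message_term == title_term
--                 or message_term.startswith(title_term)
--                 or title_term.startswith(message_term)
--             ):
--                 return True
--     return False
-- ===== SOURCE B (Python) =====
-- def run_has_term_overlap(title_terms: set, msg_terms: set) -> bool:
--     # Hash-index approach: build the set of all length>=4 prefixes of the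
--     # qualifying title terms once, then each message term is checked by
--     # set lookups instead of a scan over all title terms.
--     titles = {t for t in title_terms if len(t) >= 4}
--     prefixes = {t[:k] for t in titles for k in range(4, len(t) + 1)}
--     for m in msg_terms:
--         if len(m) < 4:
--             continue
--         if m in prefixes:
--             return True
--         for k in range(4, len(m) + 1):
--             if m[:k] in titles:
--                 return True
--     return False
-- ===== Notes on version B (the rewrite author's own statement) =====
-- stated objective: alternative
-- what changed: Replaced the nested scan over all (message, title) pairs by a hash index: all length>=4 prefixes of qualifying title terms are collected into a set once, so each message term is decided by set lookups (its own membership in the prefix set, and each of its prefixes in the title set) with no inner scan over title terms.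
import Mathlib
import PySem

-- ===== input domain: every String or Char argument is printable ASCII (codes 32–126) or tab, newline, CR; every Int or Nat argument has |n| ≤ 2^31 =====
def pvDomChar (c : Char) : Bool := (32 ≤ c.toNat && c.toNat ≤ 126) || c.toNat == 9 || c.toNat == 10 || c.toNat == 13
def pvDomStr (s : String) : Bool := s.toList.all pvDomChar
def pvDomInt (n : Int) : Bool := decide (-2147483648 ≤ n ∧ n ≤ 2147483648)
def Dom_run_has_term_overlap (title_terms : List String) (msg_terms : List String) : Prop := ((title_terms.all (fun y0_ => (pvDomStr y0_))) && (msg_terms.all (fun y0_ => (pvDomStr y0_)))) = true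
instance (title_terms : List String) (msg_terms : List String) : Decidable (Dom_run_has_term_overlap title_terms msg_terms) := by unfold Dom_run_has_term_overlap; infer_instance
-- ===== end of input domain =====

-- B replaces A's nested pairwise scan by a set of all length>=4 prefixes of the
-- qualifying title terms, built once, so each message term is decided by set
-- lookups (objective: alternative algorithm; neither version mutates its arguments).

-- ===== PORT A =====
def pvInnerA (message_term : String) : List String → Bool
  | [] => false
  | title_term :: rest =>
    if PySem.Str.len title_term < 4 then pvInnerA message_term rest
    else if message_term == title_term
         || PySem.Str.startswith message_term title_term
         || PySem.Str.startswith title_term message_term then true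
    else pvInnerA message_term rest

def pvOuterA (title_terms : List String) : List String → Bool
  | [] => false
  | message_term :: rest =>
    if PySem.Str.len message_term < 4 then pvOuterA title_terms rest
    else if pvInnerA message_term title_terms then true
    else pvOuterA title_terms rest

def run_has_term_overlap (title_terms : List String) (msg_terms : List String) : Bool :=
  pvOuterA title_terms msg_terms

-- ===== PORT B =====
def pvTitlesB (title_terms : List String) : PySem.Set String :=
  PySem.Set.ofList (title_terms.filter (fun t => decide (4 ≤ PySem.Str.len t)))

def pvPrefixesB (titles : PySem.Set String) : PySem.Set String :=
  PySem.Set.ofList (titles.flatMap (fun t =>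
    (PySem.List.pyRange 4 (PySem.Str.len t + 1)).map (fun k => PySem.Str.slice t none (some k))))

def pvScanB (titles prefixes : PySem.Set String) : List String → Bool
  | [] => false
  | m :: rest =>
    if PySem.Str.len m < 4 then pvScanB titles prefixes rest
    else if PySem.Set.contains prefixes m then true
    else if (PySem.List.pyRange 4 (PySem.Str.len m + 1)).any
              (fun k => PySem.Set.contains titles (PySem.Str.slice m none (some k))) then true
    else pvScanB titles prefixes rest

def run_has_term_overlap_alt (title_terms : List String) (msg_terms : List String) : Bool :=
  pvScanB (pvTitlesB title_terms) (pvPrefixesB (pvTitlesB title_terms)) msg_terms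

-- ===== PRECONDITION & SPEC =====
def Spec_run_has_term_overlap (title_terms : List String) (msg_terms : List String) (out : Bool) : Prop := out = run_has_term_overlap_alt title_terms msg_terms
instance (title_terms : List String) (msg_terms : List String) (out : Bool) : Decidable (Spec_run_has_term_overlap title_terms msg_terms out) := by unfold Spec_run_has_term_overlap; infer_instance

-- ===== CLAIM (what is proved, stated in full; the proofs are below) =====
def Claim_equal_run_has_term_overlap : Prop := ∀ (title_terms : List String) (msg_terms : List String), Dom_run_has_term_overlap title_terms msg_terms → Spec_run_has_term_overlap title_terms msg_terms (run_has_term_overlap title_terms msg_terms)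

-- ===== LEMMAS AND PROOFS =====

-- the overlap relation both programs test
def pvOv (t m : String) : Prop := m.toList <+: t.toList ∨ t.toList <+: m.toList

lemma pvLen_eq (s : String) : PySem.Str.len s = (s.toList.length : Int) := by
  simp [pysem]

lemma pvInnerA_iff (m : String) (tt : List String) :
    pvInnerA m tt = true ↔ ∃ t ∈ tt, 4 ≤ PySem.Str.len t ∧ pvOv t m := by
  induction tt with
  | nil => simp [pvInnerA]
  | cons t ts ih =>
    by_cases h : PySem.Str.len t < 4
    · simp only [pvInnerA, if_pos h, ih]
      constructor
      · rintro ⟨u, hu, h4, hov⟩; exact ⟨u, List.mem_cons_of_mem _ hu, h4, hov⟩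
      · rintro ⟨u, hu, h4, hov⟩
        rcases List.mem_cons.mp hu with rfl | hu
        · omega
        · exact ⟨u, hu, h4, hov⟩
    · simp only [pvInnerA, if_neg h]
      by_cases hc : (m == t || PySem.Str.startswith m t || PySem.Str.startswith t m) = true
      · simp only [if_pos hc, true_iff]
        refine ⟨t, List.mem_cons_self, by omega, ?_⟩
        simp only [Bool.or_eq_true, beq_iff_eq, PySem.Str.startswith_eq,
          PySem.Chars.startswith_iff] at hc
        rcases hc with (rfl | hp) | hp
        · exact Or.inl List.prefix_rfl
        · exact Or.inr hp
        · exact Or.inl hp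
      · simp only [if_neg hc, ih]
        constructor
        · rintro ⟨u, hu, h4, hov⟩; exact ⟨u, List.mem_cons_of_mem _ hu, h4, hov⟩
        · rintro ⟨u, hu, h4, hov⟩
          rcases List.mem_cons.mp hu with rfl | hu
          · exfalso; apply hc
            simp only [Bool.or_eq_true, beq_iff_eq, PySem.Str.startswith_eq,
              PySem.Chars.startswith_iff]
            rcases hov with hp | hp
            · exact Or.inr hp
            · exact Or.inl (Or.inr hp)
          · exact ⟨u, hu, h4, hov⟩

lemma pvOuterA_iff (tt mm : List String) :
    pvOuterA tt mm = true ↔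
      ∃ m ∈ mm, 4 ≤ PySem.Str.len m ∧ ∃ t ∈ tt, 4 ≤ PySem.Str.len t ∧ pvOv t m := by
  induction mm with
  | nil => simp [pvOuterA]
  | cons m ms ih =>
    by_cases h : PySem.Str.len m < 4
    · simp only [pvOuterA, if_pos h, ih]
      constructor
      · rintro ⟨u, hu, h4, rest⟩; exact ⟨u, List.mem_cons_of_mem _ hu, h4, rest⟩
      · rintro ⟨u, hu, h4, rest⟩
        rcases List.mem_cons.mp hu with rfl | hu
        · omega
        · exact ⟨u, hu, h4, rest⟩
    · simp only [pvOuterA, if_neg h]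
      by_cases hc : pvInnerA m tt = true
      · simp only [if_pos hc, true_iff]
        exact ⟨m, List.mem_cons_self, by omega, (pvInnerA_iff m tt).mp hc⟩
      · simp only [if_neg hc, ih]
        constructor
        · rintro ⟨u, hu, h4, rest⟩; exact ⟨u, List.mem_cons_of_mem _ hu, h4, rest⟩
        · rintro ⟨u, hu, h4, rest⟩
          rcases List.mem_cons.mp hu with rfl | hu
          · exact absurd ((pvInnerA_iff u tt).mpr rest) hc
          · exact ⟨u, hu, h4, rest⟩

lemma pvMem_titles (tt : List String) (x : String) :
    x ∈ pvTitlesB tt ↔ x ∈ tt ∧ 4 ≤ PySem.Str.len x := by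
  simp [pvTitlesB, PySem.Set.mem_ofList, List.mem_filter]

lemma pvContains_set {s : PySem.Set String} {x : String} :
    PySem.Set.contains s x = true ↔ x ∈ s := by
  simp [PySem.Set.contains]

lemma pvSlice_toList (t : String) (k : Int) (hk : 0 ≤ k) :
    (PySem.Str.slice t none (some k)).toList = t.toList.take k.toNat := by
  rw [PySem.Str.toList_slice, PySem.Chars.slice_eq_listSlice, PySem.List.slice_to _ hk]

lemma pvContains_prefixes (tt : List String) (m : String) (hm : 4 ≤ PySem.Str.len m) :
    PySem.Set.contains (pvPrefixesB (pvTitlesB tt)) m = true ↔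
      ∃ t ∈ tt, 4 ≤ PySem.Str.len t ∧ m.toList <+: t.toList := by
  rw [pvContains_set]
  simp only [pvPrefixesB, PySem.Set.mem_ofList, List.mem_flatMap, List.mem_map]
  constructor
  · rintro ⟨t, ht, k, hk, rfl⟩
    rw [PySem.List.mem_pyRange_one] at hk
    rcases (pvMem_titles tt t).mp ht with ⟨httt, h4t⟩
    refine ⟨t, httt, h4t, ?_⟩
    rw [pvSlice_toList t k (by omega)]
    exact List.take_prefix _ _
  · rintro ⟨t, httt, h4t, hpre⟩
    refine ⟨t, (pvMem_titles tt t).mpr ⟨httt, h4t⟩, (m.toList.length : Int), ?_, ?_⟩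
    · rw [PySem.List.mem_pyRange_one]
      have hle : m.toList.length ≤ t.toList.length := hpre.length_le
      rw [pvLen_eq] at hm
      rw [pvLen_eq]
      omega
    · apply String.ext
      rw [pvSlice_toList t _ (by positivity), Int.toNat_natCast]
      exact (List.prefix_iff_eq_take.mp hpre).symm

lemma pvAny_titles (tt : List String) (m : String) :
    ((PySem.List.pyRange 4 (PySem.Str.len m + 1)).any
        (fun k => PySem.Set.contains (pvTitlesB tt) (PySem.Str.slice m none (some k))) = true) ↔
      ∃ t ∈ tt, 4 ≤ PySem.Str.len t ∧ t.toList <+: m.toList := by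
  rw [List.any_eq_true]
  constructor
  · rintro ⟨k, hk, hc⟩
    rw [PySem.List.mem_pyRange_one] at hk
    rcases (pvMem_titles tt _).mp (pvContains_set.mp hc) with ⟨htt, h4⟩
    refine ⟨_, htt, h4, ?_⟩
    rw [pvSlice_toList m k (by omega)]
    exact List.take_prefix _ _
  · rintro ⟨t, htt, h4, hpre⟩
    refine ⟨(t.toList.length : Int), ?_, ?_⟩
    · rw [PySem.List.mem_pyRange_one]
      have hle : t.toList.length ≤ m.toList.length := hpre.length_le
      rw [pvLen_eq] at h4
      simp only [pvLen_eq]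
      omega
    · rw [pvContains_set]
      refine (pvMem_titles tt _).mpr ⟨?_, ?_⟩
      · have : PySem.Str.slice m none (some (t.toList.length : Int)) = t := by
          apply String.ext
          rw [pvSlice_toList m _ (by positivity), Int.toNat_natCast]
          exact (List.prefix_iff_eq_take.mp hpre).symm
        rw [this]; exact htt
      · have : PySem.Str.slice m none (some (t.toList.length : Int)) = t := by
          apply String.ext
          rw [pvSlice_toList m _ (by positivity), Int.toNat_natCast]
          exact (List.prefix_iff_eq_take.mp hpre).symm
        rw [this]; exact h4

lemma pvScanB_iff (tt mm : List String) :
    pvScanB (pvTitlesB tt) (pvPrefixesB (pvTitlesB tt)) mm = true ↔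
      ∃ m ∈ mm, 4 ≤ PySem.Str.len m ∧ ∃ t ∈ tt, 4 ≤ PySem.Str.len t ∧ pvOv t m := by
  induction mm with
  | nil => simp [pvScanB]
  | cons m ms ih =>
    by_cases h : PySem.Str.len m < 4
    · simp only [pvScanB, if_pos h, ih]
      constructor
      · rintro ⟨u, hu, h4, rest⟩; exact ⟨u, List.mem_cons_of_mem _ hu, h4, rest⟩
      · rintro ⟨u, hu, h4, rest⟩
        rcases List.mem_cons.mp hu with rfl | hu
        · omega
        · exact ⟨u, hu, h4, rest⟩
    · have hm : 4 ≤ PySem.Str.len m := by omega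
      by_cases hp : PySem.Set.contains (pvPrefixesB (pvTitlesB tt)) m = true
      · simp only [pvScanB, if_neg h, if_pos hp, true_iff]
        rcases (pvContains_prefixes tt m hm).mp hp with ⟨t, htt, h4, hpre⟩
        exact ⟨m, List.mem_cons_self, hm, t, htt, h4, Or.inl hpre⟩
      · by_cases ha : ((PySem.List.pyRange 4 (PySem.Str.len m + 1)).any
            (fun k => PySem.Set.contains (pvTitlesB tt) (PySem.Str.slice m none (some k))) = true)
        · simp only [pvScanB, if_neg h, if_neg hp, if_pos ha, true_iff]
          rcases (pvAny_titles tt m).mp ha with ⟨t, htt, h4, hpre⟩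
          exact ⟨m, List.mem_cons_self, hm, t, htt, h4, Or.inr hpre⟩
        · simp only [pvScanB, if_neg h, if_neg hp, if_neg ha, ih]
          constructor
          · rintro ⟨u, hu, h4, rest⟩; exact ⟨u, List.mem_cons_of_mem _ hu, h4, rest⟩
          · rintro ⟨u, hu, h4, rest⟩
            rcases List.mem_cons.mp hu with rfl | hu
            · rcases rest with ⟨t, htt, h4t, hov⟩
              rcases hov with hpre | hpre
              · exact absurd ((pvContains_prefixes tt u hm).mpr ⟨t, htt, h4t, hpre⟩) hp
              · exact absurd ((pvAny_titles tt u).mpr ⟨t, htt, h4t, hpre⟩) ha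
            · exact ⟨u, hu, h4, rest⟩

-- ===== VERDICT (by name: the statement is the Claim_ definition above) =====
theorem run_has_term_overlap_spec : Claim_equal_run_has_term_overlap := by
  intro tt mm _
  unfold Spec_run_has_term_overlap run_has_term_overlap run_has_term_overlap_alt
  rw [Bool.eq_iff_iff, pvOuterA_iff, pvScanB_iff]
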